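-- pv_equiv track=rewrite | github.com/ZiliShao222/sound-spaces | scripts/build_trajectories_from_valid_instances.py | _infer_scene_split
-- ===== SOURCE A (Python) =====
-- from typing import Any, Callable, Dict, FrozenSet, List, Optional, Set, Tuple
--
-- def _infer_scene_split(scene_id: Any) -> str:
--     if not isinstance(scene_id, str) or not scene_id.strip():
--         return "val"
--     parts = [part.strip() for part in scene_id.split("/") if part.strip()]
--     for split in ("train", "val", "test", "minival"):
--         if split in parts:
--             return split
--     return "val"
-- ===== SOURCE B (Python) =====
-- _RANK = {"train": 0, "val": 1, "test": 2, "minival": 3}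
--
-- def _infer_scene_split(scene_id):
--     if not isinstance(scene_id, str) or not scene_id.strip():
--         return "val"
--     best = None  # (rank, name) with the smallest rank seen so far
--     for part in scene_id.split("/"):
--         p = part.strip()
--         r = _RANK.get(p)
--         if r is not None and (best is None or r < best[0]):
--             best = (r, p)
--     return best[1] if best is not None else "val"
-- ===== Notes on version B (the rewrite author's own statement) =====
-- stated objective: alternative
-- what changed: Instead of looping over the four split names and membership-scanning the parts list for each, B makes a single pass over the path parts keeping the (rank, name) pair with the smallest priority rank from a fixed rank dict.
import Mathlib
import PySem

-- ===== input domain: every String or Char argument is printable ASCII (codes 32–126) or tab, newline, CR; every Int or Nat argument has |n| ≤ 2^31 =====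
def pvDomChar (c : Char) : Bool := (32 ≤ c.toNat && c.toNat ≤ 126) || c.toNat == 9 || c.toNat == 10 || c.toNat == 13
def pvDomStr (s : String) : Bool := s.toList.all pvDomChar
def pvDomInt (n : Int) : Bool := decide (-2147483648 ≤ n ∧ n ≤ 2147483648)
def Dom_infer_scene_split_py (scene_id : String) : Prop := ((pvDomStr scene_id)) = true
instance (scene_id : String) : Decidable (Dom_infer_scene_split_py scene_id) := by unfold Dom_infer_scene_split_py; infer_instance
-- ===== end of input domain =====

-- B replaces A's loop over the four split names (each a membership scan of parts) by a single
-- pass over the parts keeping the (rank, name) of smallest priority rank; objective: alternative.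

-- ===== PORT A =====
-- parts = [part.strip() for part in scene_id.split("/") if part.strip()]
-- scene_id.split("/"): sep "/" is nonempty, so Str.split? is always `some`
def pvSplitSlash (scene_id : String) : List String :=
  (PySem.Str.split? scene_id "/").getD []

def pvPartsA (scene_id : String) : List String :=
  ((pvSplitSlash scene_id).filter (fun part => PySem.Str.strip part ≠ "")).map
    (fun part => PySem.Str.strip part)

-- the for-loop over the literal tuple ("train","val","test","minival"), unrolled
def infer_scene_split_py (scene_id : String) : String :=
  if PySem.Str.strip scene_id = "" then "val"
  else
    let parts := pvPartsA scene_id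
    if "train" ∈ parts then "train"
    else if "val" ∈ parts then "val"
    else if "test" ∈ parts then "test"
    else if "minival" ∈ parts then "minival"
    else "val"

-- ===== PORT B =====
def pvRANK : PySem.Dict String Nat :=
  PySem.Dict.ofList [("train", 0), ("val", 1), ("test", 2), ("minival", 3)]

-- loop body: p = part.strip(); r = _RANK.get(p); update best
def pvStepB (best : Option (Nat × String)) (part : String) : Option (Nat × String) :=
  let p := PySem.Str.strip part
  match PySem.Dict.get? pvRANK p with
  | none => best
  | some r =>
    match best with
    | none => some (r, p)
    | some b => if r < b.1 then some (r, p) else best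

def infer_scene_split_py_alt (scene_id : String) : String :=
  if PySem.Str.strip scene_id = "" then "val"
  else
    match (pvSplitSlash scene_id).foldl pvStepB none with
    | some b => b.2
    | none => "val"

-- ===== PRECONDITION & SPEC =====
def Spec_infer_scene_split_py (scene_id : String) (out : String) : Prop := out = infer_scene_split_py_alt scene_id
instance (scene_id : String) (out : String) : Decidable (Spec_infer_scene_split_py scene_id out) := by unfold Spec_infer_scene_split_py; infer_instance

-- ===== CLAIM (what is proved, stated in full; the proofs are below) =====
def Claim_equal_infer_scene_split_py : Prop := ∀ (scene_id : String), Dom_infer_scene_split_py scene_id → Spec_infer_scene_split_py scene_id (infer_scene_split_py scene_id)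

-- ===== LEMMAS AND PROOFS =====

-- the min-rank element of a list, described through memberships of the four names
def pvM (L : List String) : Option (Nat × String) :=
  if "train" ∈ L then some (0, "train")
  else if "val" ∈ L then some (1, "val")
  else if "test" ∈ L then some (2, "test")
  else if "minival" ∈ L then some (3, "minival")
  else none

-- left-biased min combination on Option (Nat × String)
def pvComb (a b : Option (Nat × String)) : Option (Nat × String) :=
  match a, b with
  | none, b => b
  | a, none => a
  | some x, some y => if y.1 < x.1 then some y else some x

theorem pvComb_assoc (a b c : Option (Nat × String)) :
    pvComb (pvComb a b) c = pvComb a (pvComb b c) := by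
  rcases a with _ | x <;> rcases b with _ | y <;> rcases c with _ | z <;> try rfl
  all_goals try (simp only [pvComb]; split_ifs <;> rfl)
  by_cases h1 : y.1 < x.1 <;> by_cases h2 : z.1 < y.1 <;> by_cases h3 : z.1 < x.1 <;>
    simp [pvComb, h1, h2, h3] <;> omega

theorem pvStepB_eq (best : Option (Nat × String)) (part : String) :
    pvStepB best part = pvComb best (pvStepB none part) := by
  unfold pvStepB
  rcases h : PySem.Dict.get? pvRANK (PySem.Str.strip part) with _ | r <;>
    rcases best with _ | b <;> simp [h, pvComb]

theorem pvM_cons (y : String) (L : List String) :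
    pvM (y :: L) =
      pvComb (match PySem.Dict.get? pvRANK y with
              | none => none
              | some r => some (r, y)) (pvM L) := by
  have g0 : PySem.Dict.get? pvRANK "train" = some 0 := by decide
  have g1 : PySem.Dict.get? pvRANK "val" = some 1 := by decide
  have g2 : PySem.Dict.get? pvRANK "test" = some 2 := by decide
  have g3 : PySem.Dict.get? pvRANK "minival" = some 3 := by decide
  by_cases h0 : y = "train"
  · subst h0; simp [pvM, g0, pvComb]; split_ifs <;> simp_all
  by_cases h1 : y = "val"
  · subst h1
    simp only [pvM, g1, List.mem_cons]
    split_ifs with c1 c2 c3 c4 c5 <;> simp_all [pvComb]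
  by_cases h2 : y = "test"
  · subst h2
    simp only [pvM, g2, List.mem_cons]
    split_ifs <;> simp_all [pvComb]
  by_cases h3 : y = "minival"
  · subst h3
    simp only [pvM, g3, List.mem_cons]
    split_ifs <;> simp_all [pvComb]
  · have n0 : ¬ ("train" = y) := fun h => h0 h.symm
    have n1 : ¬ ("val" = y) := fun h => h1 h.symm
    have n2 : ¬ ("test" = y) := fun h => h2 h.symm
    have n3 : ¬ ("minival" = y) := fun h => h3 h.symm
    have hm : pvRANK = PySem.Dict.mk [("train", 0), ("val", 1), ("test", 2), ("minival", 3)] := by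
      decide
    have hg : PySem.Dict.get? pvRANK y = none := by
      rw [hm]
      simp [PySem.Dict.get?_mk_cons, n0, n1, n2, n3]
      rfl
    simp [pvM, pvComb, hg, n0, n1, n2, n3]

theorem pvStepB_none (x : String) :
    pvStepB none x =
      (match PySem.Dict.get? pvRANK (PySem.Str.strip x) with
       | none => none
       | some r => some (r, PySem.Str.strip x)) := by
  unfold pvStepB
  rcases h : PySem.Dict.get? pvRANK (PySem.Str.strip x) with _ | r <;> simp [h]

theorem pvFold_eq (L : List String) :
    ∀ acc, L.foldl pvStepB acc = pvComb acc (pvM (L.map PySem.Str.strip)) := by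
  induction L with
  | nil => intro acc; rcases acc with _ | a <;> simp [pvM, pvComb]
  | cons x L ih =>
    intro acc
    simp only [List.foldl_cons, List.map_cons]
    rw [ih, pvStepB_eq, pvComb_assoc, pvM_cons, pvStepB_none]

-- membership of a nonempty name survives A's filter-out of empty stripped parts
theorem pvMemPartsA (scene_id : String) (name : String) (hne : name ≠ "") :
    (name ∈ pvPartsA scene_id) ↔ name ∈ (pvSplitSlash scene_id).map PySem.Str.strip := by
  simp only [pvPartsA, List.mem_map, List.mem_filter]
  constructor
  · rintro ⟨x, ⟨hx, _⟩, rfl⟩; exact ⟨x, hx, rfl⟩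
  · rintro ⟨x, hx, rfl⟩; exact ⟨x, ⟨hx, by simpa using hne⟩, rfl⟩

-- ===== VERDICT (by name: the statement is the Claim_ definition above) =====
theorem infer_scene_split_py_spec : Claim_equal_infer_scene_split_py := by
  intro scene_id _
  unfold Spec_infer_scene_split_py infer_scene_split_py infer_scene_split_py_alt
  by_cases hs : PySem.Str.strip scene_id = ""
  · simp [hs]
  · simp only [hs, if_false]
    rw [pvFold_eq]
    have e0 := pvMemPartsA scene_id "train" (by decide)
    have e1 := pvMemPartsA scene_id "val" (by decide)
    have e2 := pvMemPartsA scene_id "test" (by decide)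
    have e3 := pvMemPartsA scene_id "minival" (by decide)
    simp only [pvComb, pvM, e0, e1, e2, e3]
    split_ifs <;> rfl
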